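-- pv_equiv track=rewrite | github.com/OliviaKnestaut/CS171 | 05_Name_Numbers.py | nameNumber
-- ===== SOURCE A (Python) =====
-- def sumDigits(number):
--     listOfDigits = []
--     while len(str(number)) > 1:
--         for num in str(number):
--             listOfDigits.append(int(num))
--         number = sum(listOfDigits)
--         listOfDigits.clear()
--     return number
--
-- def nameNumber(name):
--     letterNums = {
--         "A" : 1,
--         "B" : 2,
--         "C" : 3,
--         "D" : 4,
--         "E" : 5,
--         "F" : 8,
--         "G" : 3,
--         "H" : 5,
--         "I" : 1,
--         "J" : 1,
--         "K" : 2,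
--         "L" : 3,
--         "M" : 4,
--         "N" : 5,
--         "O" : 7,
--         "P" : 8,
--         "Q" : 1,
--         "R" : 2,
--         "S" : 3,
--         "T" : 4,
--         "U" : 6,
--         "V" : 6,
--         "W" : 6,
--         "X" : 5,
--         "Y" : 1,
--         "Z" : 7
--         }
--     number = 0
--     name = name.upper()
--     for letter in name:
--         try:
--             #number += letterNums.get(letter)
--             number += letterNums[letter]
--         except:
--             number += 0
--     number = sumDigits(number)
--     return number
-- ===== SOURCE B (Python) =====
-- def nameNumber(name):
--     tbl = "12345835112345781234666517"
--     total = sum(int(tbl[ord(c) - 65]) for c in name.upper() if 'A' <= c <= 'Z')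
--     return 0 if total == 0 else 1 + (total - 1) % 9
-- ===== Notes on version B (the rewrite author's own statement) =====
-- stated objective: simpler
-- what changed: B replaces the dict plus try/except accumulation with a single filtered comprehension indexing a 26-digit string table by ord(c)-65, and replaces the repeated stringify-and-sum-digits reduction loop with the closed-form digital root 1 + (total-1) % 9.
import Mathlib
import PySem

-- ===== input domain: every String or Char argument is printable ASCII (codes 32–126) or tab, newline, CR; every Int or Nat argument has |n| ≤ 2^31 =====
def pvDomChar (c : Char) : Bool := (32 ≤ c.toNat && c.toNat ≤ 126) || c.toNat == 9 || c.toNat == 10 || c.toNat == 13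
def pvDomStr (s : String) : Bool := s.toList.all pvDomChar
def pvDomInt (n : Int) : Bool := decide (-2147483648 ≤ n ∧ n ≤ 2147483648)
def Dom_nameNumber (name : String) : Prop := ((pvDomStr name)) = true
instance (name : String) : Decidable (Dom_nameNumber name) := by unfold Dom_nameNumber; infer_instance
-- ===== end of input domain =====

-- B totals the name in one filtered pass over a 26-digit string table indexed by ord(c)-65
-- (instead of A's dict with try/except) and replaces A's repeated stringify-and-sum-digits
-- reduction loop with the closed-form digital root 1 + (total-1) % 9, for a simpler program.

-- ===== PORT A =====
-- 'while len(str(number)) > 1: number = sum of int(d) appended per char of str(number)'.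
-- The loop is ported with a fuel counter of number.toNat + 1, which only makes the
-- recursion total; the proofs show it never runs out on the nonnegative totals
-- nameNumber produces. int(num) on a digit char is PySem.Int.ofChars? [c]; the
-- .getD 0 never fires on the digit characters this sees.
def sumDigitsGo (fuel : Nat) (number : Int) : Int :=
  match fuel with
  | 0 => number
  | fuel + 1 =>
    if 1 < (PySem.Int.toChars number).length then
      sumDigitsGo fuel
        (((PySem.Int.toChars number).foldl
            (fun l c => l ++ [(PySem.Int.ofChars? [c]).getD 0]) ([] : List Int)).sum)
    else number

def sumDigits (number : Int) : Int := sumDigitsGo (number.toNat + 1) number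

-- Python's try: number += letterNums[letter] / except: number += 0 is exactly a default-0 lookup.
def letterNums : PySem.Dict Char Int := PySem.Dict.ofList
  [('A', 1), ('B', 2), ('C', 3), ('D', 4), ('E', 5), ('F', 8), ('G', 3), ('H', 5),
   ('I', 1), ('J', 1), ('K', 2), ('L', 3), ('M', 4), ('N', 5), ('O', 7), ('P', 8),
   ('Q', 1), ('R', 2), ('S', 3), ('T', 4), ('U', 6), ('V', 6), ('W', 6), ('X', 5),
   ('Y', 1), ('Z', 7)]

def nameNumber (name : String) : Int :=
  let number : Int :=
    (PySem.Str.upper name).toList.foldl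
      (fun number letter => number + letterNums.getD letter 0) 0
  sumDigits number

-- ===== PORT B =====
-- tbl = "12345835112345781234666517"; total = sum(int(tbl[ord(c)-65]) for c in name.upper()
-- if 'A' <= c <= 'Z'); the .getD fallbacks never fire because the filter keeps the index
-- in range and the table holds only digit characters.
def pvTbl : List Char := "12345835112345781234666517".toList

def nameNumber_alt (name : String) : Int :=
  let total : Int :=
    (((PySem.Str.upper name).toList.filter
        (fun c => decide ('A' ≤ c) && decide (c ≤ 'Z'))).map
      (fun c =>
        (PySem.Int.ofChars?
          [(PySem.List.pyGet? pvTbl ((c.toNat : Int) - 65)).getD ' ']).getD 0)).sum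
  if total = 0 then 0 else 1 + PySem.Int.mod (total - 1) 9

-- ===== PRECONDITION & SPEC =====
def Spec_nameNumber (name : String) (out : Int) : Prop := out = nameNumber_alt name
instance (name : String) (out : Int) : Decidable (Spec_nameNumber name out) := by unfold Spec_nameNumber; infer_instance

-- ===== CLAIM (what is proved, stated in full; the proofs are below) =====
def Claim_equal_nameNumber : Prop := ∀ (name : String), Dom_nameNumber name → Spec_nameNumber name (nameNumber name)

-- ===== LEMMAS AND PROOFS =====

-- str(n) for positive n is the base-10 digit characters, most significant first.
lemma pv_toDigitsCore_eq (f : Nat) : ∀ (n : Nat) (acc : List Char), 0 < n → n ≤ f →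
    Nat.toDigitsCore 10 f n acc = (Nat.digits 10 n).reverse.map Nat.digitChar ++ acc := by
  induction f with
  | zero => intro n acc hn hf; omega
  | succ f ih =>
    intro n acc hn hf
    rw [Nat.digits_def' (by norm_num : (1:Nat) < 10) hn]
    simp only [Nat.toDigitsCore]
    by_cases h : n / 10 = 0
    · simp [h, Nat.digits_zero]
    · rw [if_neg h, ih (n / 10) _ (Nat.pos_of_ne_zero h) (by omega)]
      simp

lemma pv_toChars_natCast (m : Nat) (hm : 0 < m) :
    PySem.Int.toChars (m : Int) = (Nat.digits 10 m).reverse.map Nat.digitChar := by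
  have : PySem.Int.toChars (m : Int) = Nat.toDigits 10 m := by
    simp [PySem.Int.toChars]
  rw [this]
  show Nat.toDigitsCore 10 (m + 1) m [] = _
  rw [pv_toDigitsCore_eq (m + 1) m [] hm (by omega)]
  simp

lemma pv_digit_val (d : Nat) (hd : d < 10) :
    (PySem.Int.ofChars? [Nat.digitChar d]).getD 0 = (d : Int) := by
  interval_cases d <;> decide

-- one pass of A's inner for-loop: the list of int(digit)s sums to the digit sum.
lemma pv_digitStep (m : Nat) :
    ((PySem.Int.toChars (m : Int)).map (fun c => (PySem.Int.ofChars? [c]).getD 0)).sum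
      = ((Nat.digits 10 m).sum : Int) := by
  rcases Nat.eq_zero_or_pos m with h | h
  · subst h; decide
  · rw [pv_toChars_natCast m h, List.map_map, Nat.cast_list_sum,
        ← List.sum_reverse ((Nat.digits 10 m).map Nat.cast), ← List.map_reverse]
    apply congrArg
    apply List.map_congr_left
    intro d hd
    exact pv_digit_val d (Nat.digits_lt_base (by norm_num) (List.mem_reverse.mp hd))

lemma pv_sum_digits_le (m : Nat) : (Nat.digits 10 m).sum ≤ m := by
  induction m using Nat.strong_induction_on with
  | _ m ih =>
    rcases Nat.eq_zero_or_pos m with h | h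
    · simp [h]
    · rw [Nat.digits_def' (by norm_num : (1:Nat) < 10) h]
      have h1 : (Nat.digits 10 (m / 10)).sum ≤ m / 10 := ih (m / 10) (by omega)
      simp only [List.sum_cons]
      omega

lemma pv_sum_digits_lt (m : Nat) (h : 10 ≤ m) : (Nat.digits 10 m).sum < m := by
  rw [Nat.digits_def' (by norm_num : (1:Nat) < 10) (by omega)]
  have h1 : (Nat.digits 10 (m / 10)).sum ≤ m / 10 := pv_sum_digits_le (m / 10)
  simp only [List.sum_cons]
  omega

lemma pv_sum_digits_pos (m : Nat) (h : 0 < m) : 0 < (Nat.digits 10 m).sum := by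
  induction m using Nat.strong_induction_on with
  | _ m ih =>
    rw [Nat.digits_def' (by norm_num : (1:Nat) < 10) h]
    simp only [List.sum_cons]
    by_cases h10 : m % 10 = 0
    · have : 0 < (Nat.digits 10 (m / 10)).sum := ih (m / 10) (by omega) (by omega)
      omega
    · omega

lemma pv_len_toChars_small (m : Nat) (h : m < 10) :
    (PySem.Int.toChars (m : Int)).length = 1 := by
  rcases Nat.eq_zero_or_pos m with h0 | h0
  · subst h0; decide
  · rw [pv_toChars_natCast m h0, Nat.digits_def' (by norm_num : (1:Nat) < 10) h0]
    have : m / 10 = 0 := by omega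
    simp [this]

lemma pv_len_toChars_big (m : Nat) (h : 10 ≤ m) :
    1 < (PySem.Int.toChars (m : Int)).length := by
  rw [pv_toChars_natCast m (by omega), Nat.digits_def' (by norm_num : (1:Nat) < 10) (by omega)]
  have : Nat.digits 10 (m / 10) ≠ [] := Nat.digits_ne_nil_iff_ne_zero.mpr (by omega)
  simp only [List.length_map, List.length_reverse, List.length_cons]
  have := List.length_pos_iff.mpr this
  omega

-- the digit-sum loop computes the digital root, in B's closed form.
lemma pv_go (m : Nat) : ∀ fuel : Nat, m < fuel →
    sumDigitsGo fuel (m : Int)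
      = if (m : Int) = 0 then 0 else 1 + PySem.Int.mod ((m : Int) - 1) 9 := by
  induction m using Nat.strong_induction_on with
  | _ m ih =>
    intro fuel hf
    match fuel, hf with
    | f + 1, hf =>
      rw [sumDigitsGo]
      by_cases hm : m < 10
      · rw [if_neg (by rw [pv_len_toChars_small m hm]; omega)]
        rw [PySem.Int.mod_eq_emod_of_pos (by norm_num)]
        by_cases h0 : m = 0
        · simp [h0]
        · rw [if_neg (by exact_mod_cast h0)]
          omega
      · rw [if_pos (pv_len_toChars_big m (by omega)),
            PySem.List.foldl_append_singleton_eq_map, List.nil_append, pv_digitStep m]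
        set s := (Nat.digits 10 m).sum with hs
        have hlt : s < m := pv_sum_digits_lt m (by omega)
        have hpos : 0 < s := pv_sum_digits_pos m (by omega)
        rw [ih s hlt f (by omega)]
        have hmod : m % 9 = s % 9 := Nat.modEq_nine_digits_sum m
        rw [if_neg (Int.natCast_ne_zero.mpr (by omega : s ≠ 0))]
        rw [if_neg (Int.natCast_ne_zero.mpr (by omega : m ≠ 0))]
        rw [PySem.Int.mod_eq_emod_of_pos (by norm_num), PySem.Int.mod_eq_emod_of_pos (by norm_num)]
        omega

-- B's per-character value: the table lookup under the letter filter.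
def pvBVal (c : Char) : Int :=
  if ('A' ≤ c) ∧ (c ≤ 'Z') then
    (PySem.Int.ofChars? [(PySem.List.pyGet? pvTbl ((c.toNat : Int) - 65)).getD ' ']).getD 0
  else 0

-- summing over the filtered map is summing the guarded value over every character.
lemma pv_filter_map_sum (l : List Char) :
    ((l.filter (fun c => decide ('A' ≤ c) && decide (c ≤ 'Z'))).map
      (fun c =>
        (PySem.Int.ofChars?
          [(PySem.List.pyGet? pvTbl ((c.toNat : Int) - 65)).getD ' ']).getD 0)).sum
      = (l.map pvBVal).sum := by
  induction l with
  | nil => simp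
  | cons c t ih =>
    by_cases hc : ('A' ≤ c) ∧ (c ≤ 'Z')
    · rw [List.filter_cons_of_pos (by simp [hc.1, hc.2])]
      simp only [List.map_cons, List.sum_cons, ih, pvBVal, if_pos hc]
    · rw [List.filter_cons_of_neg (by
        simp only [Bool.and_eq_true, decide_eq_true_eq]
        exact fun h => hc h)]
      simp only [List.map_cons, List.sum_cons, ih, pvBVal, if_neg hc]
      omega

-- per-character agreement between B's table value and A's dict lookup,
-- by exhausting the 127 relevant character codes.
set_option maxRecDepth 40000 in
lemma pv_val_table : ∀ n : Fin 127,
    pvBVal (Char.ofNat n.val) = letterNums.getD (Char.ofNat n.val) 0 := by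
  decide

lemma pv_val (c : Char) (h : c.toNat < 127) :
    pvBVal c = letterNums.getD c 0 := by
  have := pv_val_table ⟨c.toNat, h⟩
  rwa [Char.ofNat_toNat] at this

set_option maxRecDepth 40000 in
lemma pv_upper_small_table : ∀ n : Fin 127,
    (PySem.Chars.upperChar (Char.ofNat n.val)).toNat < 127 := by
  decide

lemma pv_upper_small (c : Char) (h : c.toNat < 127) :
    (PySem.Chars.upperChar c).toNat < 127 := by
  have := pv_upper_small_table ⟨c.toNat, h⟩
  rwa [Char.ofNat_toNat] at this

set_option maxRecDepth 40000 in
lemma pv_getD_nonneg_table : ∀ n : Fin 127,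
    0 ≤ letterNums.getD (Char.ofNat n.val) 0 := by
  decide

lemma pv_getD_nonneg (c : Char) (h : c.toNat < 127) : 0 ≤ letterNums.getD c 0 := by
  have := pv_getD_nonneg_table ⟨c.toNat, h⟩
  rwa [Char.ofNat_toNat] at this

-- ===== VERDICT (by name: the statement is the Claim_ definition above) =====
theorem nameNumber_spec : Claim_equal_nameNumber := by
  intro name hdom
  unfold Spec_nameNumber
  simp only [nameNumber, nameNumber_alt]
  have hupper : (PySem.Str.upper name).toList = name.toList.map PySem.Chars.upperChar := by
    simp [pysem, PySem.Chars.upper]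
  have hmem : ∀ c ∈ name.toList, pvDomChar c = true :=
    fun c hc => List.all_eq_true.mp hdom c hc
  have hsmall : ∀ c ∈ (PySem.Str.upper name).toList, c.toNat < 127 := by
    intro c hc
    rw [hupper] at hc
    obtain ⟨c0, hc0, rfl⟩ := List.mem_map.mp hc
    have hd := hmem c0 hc0
    simp only [pvDomChar, Bool.or_eq_true, Bool.and_eq_true, decide_eq_true_eq,
      beq_iff_eq] at hd
    exact pv_upper_small c0 (by omega)
  rw [PySem.List.foldl_add, zero_add, pv_filter_map_sum]
  have hvals : ((PySem.Str.upper name).toList.map pvBVal).sum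
      = ((PySem.Str.upper name).toList.map (fun c => letterNums.getD c 0)).sum := by
    apply congrArg
    exact List.map_congr_left (fun c hc => pv_val c (hsmall c hc))
  rw [hvals]
  set total : Int := ((PySem.Str.upper name).toList.map (fun c => letterNums.getD c 0)).sum
    with htotal
  have hnn : 0 ≤ total := by
    rw [htotal]
    apply List.sum_nonneg
    intro x hx
    obtain ⟨c, hc, rfl⟩ := List.mem_map.mp hx
    exact pv_getD_nonneg c (hsmall c hc)
  unfold sumDigits
  have hcast : ((total.toNat : Int)) = total := Int.toNat_of_nonneg hnn
  rw [← hcast]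
  exact pv_go total.toNat (total.toNat + 1) (by omega)
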